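-- pv_equiv track=rewrite | github.com/miliar/Code_Jam_Webscraper | Solutions_python/Problem_178/182.py | solve
-- ===== SOURCE A (Python) =====
-- def solve(pancakes):
--     answer = 0
--     n = len(pancakes)
--     pancakes += '+'
--     for i in range(n):
--         if pancakes[i] != pancakes[i+1]:
--             answer += 1
--     return answer
-- ===== SOURCE B (Python) =====
-- def solve(pancakes):
--     # divide and conquer: transitions in s[i:j] = transitions(i,m) + transitions(m,j)
--     # + 1 if the boundary pair s[m-1], s[m] differs
--     s = pancakes + '+'
--     def trans(i, j):
--         if j - i <= 1:
--             return 0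
--         m = (i + j) // 2
--         return trans(i, m) + trans(m, j) + (1 if s[m - 1] != s[m] else 0)
--     return trans(0, len(s))
-- ===== Notes on version B (the rewrite author's own statement) =====
-- stated objective: alternative
-- what changed: B computes the count by divide-and-conquer on index ranges of pancakes+'+' (transitions of a range = transitions of each half plus the boundary comparison), instead of A's single left-to-right indexed scan.
import Mathlib
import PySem

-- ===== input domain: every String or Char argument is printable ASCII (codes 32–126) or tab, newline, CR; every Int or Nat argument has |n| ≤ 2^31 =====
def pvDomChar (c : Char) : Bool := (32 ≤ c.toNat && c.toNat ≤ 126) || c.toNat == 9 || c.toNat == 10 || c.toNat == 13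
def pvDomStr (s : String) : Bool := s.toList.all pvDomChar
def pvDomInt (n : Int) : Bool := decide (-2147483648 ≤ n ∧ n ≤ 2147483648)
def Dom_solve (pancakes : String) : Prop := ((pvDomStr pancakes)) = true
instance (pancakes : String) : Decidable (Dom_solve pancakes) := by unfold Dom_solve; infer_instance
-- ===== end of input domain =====

-- B computes the transition count by divide-and-conquer on index ranges of pancakes+'+'
-- (transitions of a range = transitions of each half + the boundary comparison), instead of
-- A's single left-to-right indexed scan; alternative algorithm, same asymptotic cost.


-- ===== PORT A =====
def solve (pancakes : String) : Int :=
  let answer : Int := 0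
  let n : Int := PySem.Str.len pancakes
  let p : String := pancakes ++ "+"
  (PySem.List.pyRange 0 n).foldl
    (fun acc i =>
      if PySem.Str.pyGet? p i ≠ PySem.Str.pyGet? p (i + 1) then acc + 1 else acc)
    answer

-- ===== PORT B =====
/-- B's nested `trans(i, j)`: recursion on the index range [i, j) over the fixed list `s`.
    Python's `s[m-1]`/`s[m]` indices are always in range here (i < m < j ≤ len s),
    so `s[m-1]?`/`s[m]?` is exact. -/
def pvBTrans (s : List Char) (i j : Nat) : Int :=
  if j ≤ i + 1 then 0
  else
    let m := (i + j) / 2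
    pvBTrans s i m + pvBTrans s m j + (if s[m - 1]? ≠ s[m]? then 1 else 0)
termination_by j - i
decreasing_by all_goals omega

def solve_alt (pancakes : String) : Int :=
  let s := (pancakes ++ "+").toList
  pvBTrans s 0 s.length

-- ===== PRECONDITION & SPEC =====
def Spec_solve (pancakes : String) (out : Int) : Prop := out = solve_alt pancakes
instance (pancakes : String) (out : Int) : Decidable (Spec_solve pancakes out) := by unfold Spec_solve; infer_instance

-- ===== CLAIM (what is proved, stated in full; the proofs are below) =====
def Claim_equal_solve : Prop := ∀ (pancakes : String), Dom_solve pancakes → Spec_solve pancakes (solve pancakes)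

-- ===== LEMMAS AND PROOFS =====

/-- Number of adjacent unequal pairs in a character list (the common middle form). -/
def pvTrans : List Char → Int
  | a :: b :: t => (if a ≠ b then (1 : Int) else 0) + pvTrans (b :: t)
  | _ => 0

lemma pvTrans_short (l : List Char) (h : l.length ≤ 1) : pvTrans l = 0 := by
  match l, h with
  | [], _ => rfl
  | [_], _ => rfl

/-- A's indexed fold, peeled from the left, equals pvTrans of the suffix. -/
lemma pvA_fold (m : Nat) : ∀ (s : List Char) (j : Nat) (acc : Int),
    s.length = j + 1 + m →
    (PySem.List.pyRange (j : Int) ((s.length : Int) - 1)).foldl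
      (fun acc i =>
        if PySem.List.pyGet? s i ≠ PySem.List.pyGet? s (i + 1) then acc + 1 else acc)
      acc
    = acc + pvTrans (s.drop j) := by
  induction m with
  | zero =>
      intro s j acc h
      have h1 : ((s.length : Int) - 1) = (j : Int) := by omega
      have h2 : PySem.List.pyRange (j : Int) (j : Int) = [] :=
        PySem.List.pyRange_one_eq_nil le_rfl
      rw [h1, h2]
      have : (s.drop j).length ≤ 1 := by simp [h]
      simp [pvTrans_short _ this]
  | succ m ih =>
      intro s j acc h
      have hj1 : j + 1 < s.length := by omega
      have hj : j < s.length := by omega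
      have hlt : (j : Int) < (s.length : Int) - 1 := by omega
      rw [PySem.List.pyRange_one_cons hlt, List.foldl_cons]
      have g1 : PySem.List.pyGet? s (j : Int) = some s[j] := by
        rw [PySem.List.pyGet?_natCast]
        simp [hj]
      have g2 : PySem.List.pyGet? s ((j : Int) + 1) = some s[j + 1] := by
        have : ((j : Int) + 1) = ((j + 1 : Nat) : Int) := by push_cast; ring
        rw [this, PySem.List.pyGet?_natCast]
        simp [hj1]
      have hd : s.drop j = s[j] :: s[j + 1] :: s.drop (j + 2) := by
        rw [List.drop_eq_getElem_cons hj, List.drop_eq_getElem_cons hj1]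
      have hd1 : s.drop (j + 1) = s[j + 1] :: s.drop (j + 2) :=
        List.drop_eq_getElem_cons hj1
      have harg : ((j : Int) + 1) = ((j + 1 : Nat) : Int) := by push_cast; ring
      rw [g1, g2, harg, ih s (j + 1) _ (by omega), hd,
        show pvTrans (s[j] :: s[j + 1] :: s.drop (j + 2))
            = (if s[j] ≠ s[j + 1] then (1 : Int) else 0) + pvTrans (s[j + 1] :: s.drop (j + 2))
          from rfl,
        ← hd1]
      by_cases hne : s[j] = s[j + 1]
      · simp [hne]
      · simp [hne]
        ring

/-- Splitting pvTrans at a cut: transitions of a concatenation of two nonempty lists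
    are the transitions of each part plus the boundary comparison. -/
lemma pvTrans_append (xs ys : List Char) (hx : xs ≠ []) (hy : ys ≠ []) :
    pvTrans (xs ++ ys)
      = pvTrans xs + pvTrans ys + (if xs.getLast? ≠ ys.head? then 1 else 0) := by
  induction xs with
  | nil => exact absurd rfl hx
  | cons a t ih =>
      cases t with
      | nil =>
          cases ys with
          | nil => exact absurd rfl hy
          | cons b u =>
              show (if a ≠ b then (1 : Int) else 0) + pvTrans (b :: u) = _
              simp [pvTrans]
              by_cases h : a = b
              · simp [h]
              · simp [h]; ring
      | cons b u =>
          have ht : (b :: u : List Char) ≠ [] := by simp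
          show (if a ≠ b then (1 : Int) else 0) + pvTrans (b :: u ++ ys) = _
          rw [ih ht]
          have : (a :: b :: u : List Char).getLast? = (b :: u).getLast? := by
            simp [List.getLast?_cons_cons]
          rw [show pvTrans (a :: b :: u)
              = (if a ≠ b then (1 : Int) else 0) + pvTrans (b :: u) from rfl, this]
          ring

/-- B's divide-and-conquer equals pvTrans of the corresponding slice. -/
lemma pvBTrans_eq (s : List Char) (d : Nat) :
    ∀ i j, j - i ≤ d → i ≤ j → j ≤ s.length →
      pvBTrans s i j = pvTrans ((s.drop i).take (j - i)) := by
  induction d with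
  | zero =>
      intro i j hd hij hj
      have hji : j ≤ i + 1 := by omega
      rw [pvBTrans, if_pos hji, pvTrans_short]
      simp; omega
  | succ d ih =>
      intro i j hd hij hj
      by_cases hsm : j ≤ i + 1
      · rw [pvBTrans, if_pos hsm, pvTrans_short]
        simp; omega
      · rw [pvBTrans, if_neg hsm]
        have hilt : i < (i + j) / 2 := by omega
        have hltj : (i + j) / 2 < j := by omega
        set m := (i + j) / 2 with hm
        show pvBTrans s i m + pvBTrans s m j + (if s[m - 1]? ≠ s[m]? then 1 else 0)
            = pvTrans ((s.drop i).take (j - i))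
        rw [ih i m (by omega) (by omega) (by omega),
            ih m j (by omega) (by omega) hj]
        -- split the slice at m
        have hsplit : (s.drop i).take (j - i)
            = (s.drop i).take (m - i) ++ (s.drop m).take (j - m) := by
          have h1 : j - i = (m - i) + (j - m) := by omega
          have hdd : (s.drop i).drop (m - i) = s.drop m := by
            rw [List.drop_drop]; congr 1; omega
          rw [h1, List.take_add, hdd]
        have hlen1 : ((s.drop i).take (m - i)).length = m - i := by
          simp; omega
        have hlen2 : ((s.drop m).take (j - m)).length = j - m := by
          simp; omega
        have hx : (s.drop i).take (m - i) ≠ [] := by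
          intro h; rw [h] at hlen1; simp at hlen1; omega
        have hy : (s.drop m).take (j - m) ≠ [] := by
          intro h; rw [h] at hlen2; simp at hlen2; omega
        rw [hsplit, pvTrans_append _ _ hx hy]
        have hlast : ((s.drop i).take (m - i)).getLast? = s[m - 1]? := by
          rw [List.getLast?_eq_getElem?, hlen1]
          have hlt : m - i - 1 < m - i := by omega
          simp [hlt, List.getElem?_drop]
          congr 1; omega
        have hhead : ((s.drop m).take (j - m)).head? = s[m]? := by
          have h0 : 0 < j - m := by omega
          simp [List.head?_eq_getElem?, h0, List.getElem?_drop]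
        rw [hlast, hhead]

lemma pv_toList_append_plus (s : String) : (s ++ "+").toList = s.toList ++ ['+'] := by
  simp

-- ===== VERDICT (by name: the statement is the Claim_ definition above) =====
theorem solve_spec : Claim_equal_solve := by
  intro pancakes _
  unfold Spec_solve solve solve_alt
  set l := pancakes.toList with hl
  -- A side reduces to pvTrans (l ++ ['+'])
  have hA :
      (PySem.List.pyRange 0 (PySem.Str.len pancakes)).foldl
        (fun acc i =>
          if PySem.Str.pyGet? (pancakes ++ "+") i ≠ PySem.Str.pyGet? (pancakes ++ "+") (i + 1)
          then acc + 1 else acc) 0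
      = pvTrans (l ++ ['+']) := by
    have hlen : PySem.Str.len pancakes = ((l ++ ['+']).length : Int) - 1 := by
      rw [PySem.Str.len_eq, hl]; simp
    have hget : ∀ i : Int, PySem.Str.pyGet? (pancakes ++ "+") i
        = PySem.List.pyGet? (l ++ ['+']) i := by
      intro i
      simp only [PySem.Str.pyGet?, PySem.Chars.pyGet?, pv_toList_append_plus, hl]
    simp only [hget, hlen]
    simpa using pvA_fold l.length (l ++ ['+']) 0 0 (by simp [Nat.add_comm])
  rw [hA]
  -- B side reduces to the same pvTrans
  rw [pv_toList_append_plus, ← hl,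
      pvBTrans_eq (l ++ ['+']) (l ++ ['+']).length 0 (l ++ ['+']).length
        le_rfl (Nat.zero_le _) le_rfl]
  simp only [List.drop_zero, Nat.sub_zero]
  rw [List.take_of_length_le le_rfl]
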